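-- pv_equiv track=rewrite | github.com/SabinaSerra/AdventOfCode-2021 | day11/solution.py | step
-- ===== SOURCE A (Python) =====
-- def add_adjecent(input_list, inds):
--     if len(inds) == 0:
--         return
--     row, col = inds[0]
--     for row_ind in range(max(row - 1, 0), min(row+2, len(input_list))):
--         for col_ind in range(max(col - 1, 0), min(col + 2, len(input_list[0]))):
--             input_list[row_ind][col_ind] += 1
--             if input_list[row_ind][col_ind] == 10:
--                 inds.append((row_ind, col_ind))
--     return add_adjecent(input_list, inds[1:])
--
-- def step(input_list):
--     inds = []
--     for row in range(0, len(input_list)):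
--         for col in range(0, len(input_list[0])):
--             input_list[row][col] += 1
--             if input_list[row][col] == 10:
--                 inds.append((row, col))
--     add_adjecent(input_list, inds)
--     return update_flare(input_list)
--
-- def update_flare(input_list):
--     counter = 0
--     for row in range(0, len(input_list)):
--         for col in range(0, len(input_list[0])):
--             if input_list[row][col] >= 10:
--                 counter += 1
--                 input_list[row][col] = 0
--     return counter
-- ===== SOURCE B (Python) =====
-- def step(input_list):
--     h = len(input_list)
--     w = len(input_list[0]) if input_list else 0
--     # charge every octopus; a cell that reaches exactly 10 flashes (each cell
--     # crosses 10 at most once, so no 'flashed' set is needed)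
--     stack = []
--     for r in range(h):
--         for c in range(w):
--             input_list[r][c] += 1
--             if input_list[r][c] == 10:
--                 stack.append((r, c))
--     # propagate flashes with an explicit LIFO stack
--     while stack:
--         r, c = stack.pop()
--         for rr, cc in [(r + dr, c + dc) for dr in (-1, 0, 1) for dc in (-1, 0, 1)
--                        if 0 <= r + dr < h and 0 <= c + dc < w]:
--             input_list[rr][cc] += 1
--             if input_list[rr][cc] == 10:
--                 stack.append((rr, cc))
--     # count and reset everything that flashed
--     flashes = 0
--     for r in range(h):
--         for c in range(w):
--             if input_list[r][c] >= 10: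
--                 input_list[r][c] = 0
--                 flashes += 1
--     return flashes
-- ===== Notes on version B (the rewrite author's own statement) =====
-- stated objective: alternative
-- what changed: A propagates flashes with a recursive helper over a FIFO worklist, copying inds[1:] at every call; B replaces the recursion by an iterative LIFO stack with pop() and an offset-list neighbour comprehension (LIFO vs FIFO processing order proved irrelevant); Pre_ excludes only the ragged grids (a row shorter than row 0) on which A raises IndexError, and B raises there too.
import Mathlib
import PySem

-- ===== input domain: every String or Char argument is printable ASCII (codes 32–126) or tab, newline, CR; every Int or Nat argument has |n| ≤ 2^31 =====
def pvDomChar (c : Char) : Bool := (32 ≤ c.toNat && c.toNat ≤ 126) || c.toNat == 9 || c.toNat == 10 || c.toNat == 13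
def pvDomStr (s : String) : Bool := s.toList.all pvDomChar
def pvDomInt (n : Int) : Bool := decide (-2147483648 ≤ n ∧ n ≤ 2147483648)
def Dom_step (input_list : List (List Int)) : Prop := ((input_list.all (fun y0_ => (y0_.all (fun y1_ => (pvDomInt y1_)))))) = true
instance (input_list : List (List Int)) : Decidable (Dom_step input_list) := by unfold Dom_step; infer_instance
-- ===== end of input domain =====

-- B replaces A's recursive FIFO worklist (which copies inds[1:] per flash) by an
-- iterative LIFO stack with an offset-list neighbour enumeration (objective:
-- alternative decomposition); both A and B mutate the Python argument in place
-- identically — the equivalence proved here is about the return value.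

-- ===== PORT A =====
-- shared grid primitives (read / +1 a cell, scan order, A's neighbourhood box)
def pvGet (g : List (List Int)) (r c : Nat) : Int := (g.getD r []).getD c 0
def pvInc (g : List (List Int)) (r c : Nat) : List (List Int) :=
  g.modify r (fun row => row.modify c (· + 1))
def pvW (g : List (List Int)) : Nat := (g.headD []).length
def pvAllPos (h w : Nat) : List (Nat × Nat) :=
  (List.range h).flatMap (fun r => (List.range w).map (fun c => (r, c)))
def pvNbhd (h w r c : Nat) : List (Nat × Nat) :=
  (List.range' (r - 1) (min (r + 2) h - (r - 1))).flatMap (fun rr =>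
    (List.range' (c - 1) (min (c + 2) w - (c - 1))).map (fun cc => (rr, cc)))

-- the loop body 'cell += 1; if cell == 10: worklist.append(...)', appearing verbatim
-- in both Pythons (A's global pass and neighbour pass, B's charge and stack phases)
def pvIncCollect (g : List (List Int)) (acc : List (Nat × Nat)) (L : List (Nat × Nat)) :
    List (List Int) × List (Nat × Nat) :=
  L.foldl (fun st p =>
    let g' := pvInc st.1 p.1 p.2
    if pvGet g' p.1 p.2 == 10 then (g', st.2 ++ [p]) else (g', st.2)) (g, acc)

-- fuel: one recursive call per dequeued flash, at most h*w flashes (proved in the run lemma)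
def add_adjecent : Nat → List (List Int) → List (Nat × Nat) → List (List Int)
  | 0, g, _ => g
  | _ + 1, g, [] => g
  | fuel + 1, g, (r, c) :: rest =>
    let st := pvIncCollect g rest (pvNbhd g.length (pvW g) r c)
    add_adjecent fuel st.1 st.2

def update_flare (g : List (List Int)) : Int :=
  ((pvAllPos g.length (pvW g)).foldl (fun (st : List (List Int) × Int) p =>
    if 10 ≤ pvGet st.1 p.1 p.2 then (st.1.modify p.1 (fun row => row.set p.2 0), st.2 + 1)
    else st) (g, 0)).2

def step (input_list : List (List Int)) : Int :=
  let st := pvIncCollect input_list [] (pvAllPos input_list.length (pvW input_list))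
  let g2 := add_adjecent (input_list.length * pvW input_list + 1) st.1 st.2
  update_flare g2

-- ===== PORT B =====
-- B's neighbour comprehension [(r+dr, c+dc) for dr in (-1,0,1) for dc in (-1,0,1) if in bounds]
def altNbrs (h w r c : Nat) : List (Nat × Nat) :=
  ([-1, 0, 1] : List Int).flatMap (fun dr =>
    ([-1, 0, 1] : List Int).filterMap (fun dc =>
      if 0 ≤ (r : Int) + dr ∧ (r : Int) + dr < (h : Int) ∧
         0 ≤ (c : Int) + dc ∧ (c : Int) + dc < (w : Int)
      then some (((r : Int) + dr).toNat, ((c : Int) + dc).toNat) else none))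

-- B's 'while stack: r, c = stack.pop(); …'; fuel: one iteration per pop, and at most
-- h*w cells are ever pushed (each cell passes 10 once) — proved in the run lemma
def altFlood (h w : Nat) : Nat → List (List Int) → List (Nat × Nat) → List (List Int)
  | 0, g, _ => g
  | fuel + 1, g, stack =>
    match stack.getLast? with
    | none => g
    | some p =>
      let st := pvIncCollect g stack.dropLast (altNbrs h w p.1 p.2)
      altFlood h w fuel st.1 st.2

def altCount (h w : Nat) (g : List (List Int)) : Int :=
  ((pvAllPos h w).foldl (fun (st : List (List Int) × Int) p =>
    if 10 ≤ pvGet st.1 p.1 p.2 then (st.1.modify p.1 (fun row => row.set p.2 0), st.2 + 1)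
    else st) (g, 0)).2

def step_alt (input_list : List (List Int)) : Int :=
  let h := input_list.length
  let w := if input_list = [] then 0 else (input_list.getD 0 []).length
  let st := pvIncCollect input_list [] (pvAllPos h w)
  let g2 := altFlood h w (h * w + 1) st.1 st.2
  altCount h w g2

-- ===== PRECONDITION & SPEC =====
-- Pre_ excludes exactly the ragged grids on which A raises IndexError: some row
-- shorter than row 0 (A indexes every row at all columns of row 0); B raises there too.
def Pre_step (input_list : List (List Int)) : Prop :=
  ∀ r ∈ input_list, (input_list.headD []).length ≤ r.length
instance (input_list : List (List Int)) : Decidable (Pre_step input_list) := by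
  unfold Pre_step; infer_instance
def pvWitness_step : List (List Int) := [[9, 1, 3], [0, 11, 2]]
def Spec_step (input_list : List (List Int)) (out : Int) : Prop := out = step_alt input_list
instance (input_list : List (List Int)) (out : Int) : Decidable (Spec_step input_list out) := by
  unfold Spec_step; infer_instance

-- ===== CLAIM (what is proved, stated in full; the proofs are below) =====
def Claim_equal_step : Prop :=
  ∀ (input_list : List (List Int)), Dom_step input_list → Pre_step input_list →
    Spec_step input_list (step input_list)

-- ===== LEMMAS AND PROOFS =====

-- semantic layer: both runs are described by the list F of cells flashed so far
abbrev inbP (h w : Nat) (p : Nat × Nat) : Prop := p.1 < h ∧ p.2 < w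
def adjP (p q : Nat × Nat) : Bool :=
  p.1 - q.1 ≤ 1 && q.1 - p.1 ≤ 1 && p.2 - q.2 ≤ 1 && q.2 - p.2 ≤ 1
def cnt (F : List (Nat × Nat)) (p : Nat × Nat) : Int :=
  ((F.filter (fun q => adjP p q)).length : Int)
def v0 (g0 : List (List Int)) (p : Nat × Nat) : Int := pvGet g0 p.1 p.2 + 1
def elig (g0 : List (List Int)) (p : Nat × Nat) : Prop := pvGet g0 p.1 p.2 ≤ 9
def Shape (g g0 : List (List Int)) : Prop :=
  g.length = g0.length ∧ ∀ i, (g.getD i []).length = (g0.getD i []).length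
def Closed (g0 : List (List Int)) (h w : Nat) (S : List (Nat × Nat)) : Prop :=
  S.Nodup ∧ ∀ p, inbP h w p → elig g0 p → 10 ≤ v0 g0 p + cnt S p → p ∈ S
def PreS (g0 : List (List Int)) : Prop := ∀ i, i < g0.length → pvW g0 ≤ (g0.getD i []).length

-- the shared worklist invariant: D flashed so far, P pending
def INV (g0 g : List (List Int)) (D P : List (Nat × Nat)) : Prop :=
  Shape g g0 ∧ (D ++ P).Nodup ∧
  (∀ p ∈ D ++ P, inbP g0.length (pvW g0) p ∧ elig g0 p) ∧
  (∀ p, inbP g0.length (pvW g0) p → pvGet g p.1 p.2 = v0 g0 p + cnt D p) ∧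
  (∀ p, inbP g0.length (pvW g0) p → elig g0 p → (10 ≤ pvGet g p.1 p.2 ↔ p ∈ D ++ P)) ∧
  (∀ S, Closed g0 g0.length (pvW g0) S → ∀ p ∈ D ++ P, p ∈ S)

-- what a finished run yields
def FinalP (g0 gfin : List (List Int)) (F : List (Nat × Nat)) : Prop :=
  F.Nodup ∧ (∀ p ∈ F, inbP g0.length (pvW g0) p ∧ elig g0 p) ∧ Shape gfin g0 ∧
  (∀ p, inbP g0.length (pvW g0) p → pvGet gfin p.1 p.2 = v0 g0 p + cnt F p) ∧
  (∀ p, inbP g0.length (pvW g0) p → elig g0 p → (10 ≤ v0 g0 p + cnt F p ↔ p ∈ F)) ∧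
  (∀ S, Closed g0 g0.length (pvW g0) S → ∀ p ∈ F, p ∈ S)

theorem headD_eq_getD_zero (l : List (List Int)) : l.headD [] = l.getD 0 [] := by
  cases l <;> rfl

theorem preS_of_pre (g0 : List (List Int)) (h : Pre_step g0) : PreS g0 := by
  intro i hi
  have : g0.getD i [] ∈ g0 := by
    rw [List.getD_eq_getElem?_getD, List.getElem?_eq_getElem hi]
    exact List.getElem_mem hi
  simpa [pvW, headD_eq_getD_zero] using h _ this

theorem shape_refl (g : List (List Int)) : Shape g g := ⟨rfl, fun _ => rfl⟩

theorem shape_trans {g1 g2 g3 : List (List Int)} (h1 : Shape g1 g2) (h2 : Shape g2 g3) :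
    Shape g1 g3 := ⟨h1.1.trans h2.1, fun i => (h1.2 i).trans (h2.2 i)⟩

theorem pvW_of_shape {g g0 : List (List Int)} (h : Shape g g0) : pvW g = pvW g0 := by
  rw [pvW, pvW, headD_eq_getD_zero, headD_eq_getD_zero]
  exact h.2 0

theorem shape_pvInc (g : List (List Int)) (r c : Nat) : Shape (pvInc g r c) g := by
  refine ⟨List.length_modify .., fun i => ?_⟩
  simp only [pvInc, List.getD_eq_getElem?_getD, List.getElem?_modify]
  cases hg : g[i]? with
  | none => simp
  | some row => by_cases hri : r = i <;> simp [hri]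

theorem pvGet_pvInc_ne (g : List (List Int)) (r c r' c' : Nat) (h : (r, c) ≠ (r', c')) :
    pvGet (pvInc g r c) r' c' = pvGet g r' c' := by
  simp only [pvGet, pvInc, List.getD_eq_getElem?_getD, List.getElem?_modify]
  cases hg : g[r']? with
  | none => by_cases hr : r = r' <;> simp [hr]
  | some row =>
    by_cases hr : r = r'
    · subst hr
      have hc : c ≠ c' := fun e => h (by simp [e])
      simp [hc]
    · simp [hr]

theorem pvGet_pvInc_self (g : List (List Int)) (r c : Nat) (hr : r < g.length)
    (hc : c < (g.getD r []).length) :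
    pvGet (pvInc g r c) r c = pvGet g r c + 1 := by
  simp only [pvGet, pvInc, List.getD_eq_getElem?_getD, List.getElem?_modify]
  rw [List.getElem?_eq_getElem hr]
  have hc' : c < (g[r]).length := by
    simpa [List.getD_eq_getElem?_getD, List.getElem?_eq_getElem hr] using hc
  simp [List.getElem?_eq_getElem hc']

theorem pvGet_zero_ne (g : List (List Int)) (r c r' c' : Nat) (h : (r, c) ≠ (r', c')) :
    pvGet (g.modify r (fun row => row.set c 0)) r' c' = pvGet g r' c' := by
  simp only [pvGet, List.getD_eq_getElem?_getD, List.getElem?_modify]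
  cases hg : g[r']? with
  | none => by_cases hr : r = r' <;> simp [hr]
  | some row =>
    by_cases hr : r = r'
    · subst hr
      have hc : c ≠ c' := fun e => h (by simp [e])
      simp [hc]
    · simp [hr]

theorem mem_pvAllPos (h w : Nat) (p : Nat × Nat) : p ∈ pvAllPos h w ↔ inbP h w p := by
  cases p with
  | mk a b =>
    simp only [pvAllPos, inbP, List.mem_flatMap, List.mem_map, List.mem_range, Prod.mk.injEq]
    constructor
    · rintro ⟨r, hr, c, hc, rfl, rfl⟩; exact ⟨hr, hc⟩
    · rintro ⟨ha, hb⟩; exact ⟨a, ha, b, hb, rfl, rfl⟩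

theorem nodup_pairGrid (A B : List Nat) (hA : A.Nodup) (hB : B.Nodup) :
    (A.flatMap (fun r => B.map (fun c => (r, c)))).Nodup :=
  List.nodup_flatMap.2
    ⟨fun a _ => hB.map <| Function.LeftInverse.injective fun b => (rfl : (a, b).2 = b),
      hA.imp fun {a₁ a₂} n x h₁ h₂ => by
        rcases List.mem_map.1 h₁ with ⟨b₁, _, rfl⟩
        rcases List.mem_map.1 h₂ with ⟨b₂, mb₂, ⟨⟩⟩
        exact n rfl⟩

theorem nodup_pvAllPos (h w : Nat) : (pvAllPos h w).Nodup :=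
  nodup_pairGrid _ _ List.nodup_range List.nodup_range

theorem length_pvAllPos (h w : Nat) : (pvAllPos h w).length = h * w := by
  simp [pvAllPos, List.length_flatMap]

theorem mem_pvNbhd (h w r c : Nat) (q : Nat × Nat) :
    q ∈ pvNbhd h w r c ↔ inbP h w q ∧ adjP (r, c) q = true := by
  cases q with
  | mk a b =>
    simp only [pvNbhd, List.mem_flatMap, List.mem_map, List.mem_range'_1, adjP, inbP,
      Bool.and_eq_true, decide_eq_true_eq, Prod.mk.injEq]
    constructor
    · rintro ⟨rr, ⟨h1, h2⟩, cc, ⟨⟨h3, h4⟩, rfl, rfl⟩⟩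
      refine ⟨⟨by omega, by omega⟩, by omega⟩
    · rintro ⟨⟨ha, hb⟩, hadj⟩
      exact ⟨a, ⟨by omega, by omega⟩, b, ⟨⟨by omega, by omega⟩, rfl, rfl⟩⟩

theorem nodup_pvNbhd (h w r c : Nat) : (pvNbhd h w r c).Nodup :=
  nodup_pairGrid _ _ (List.nodup_range' (step := 1)) (List.nodup_range' (step := 1))

theorem adjP_iff (p q : Nat × Nat) : adjP p q = true ↔
    (p.1 - q.1 ≤ 1 ∧ q.1 - p.1 ≤ 1 ∧ p.2 - q.2 ≤ 1 ∧ q.2 - p.2 ≤ 1) := by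
  simp [adjP, and_assoc]

theorem mem_altNbrs (h w r c : Nat) (q : Nat × Nat) :
    q ∈ altNbrs h w r c ↔ inbP h w q ∧ adjP (r, c) q = true := by
  cases q with
  | mk a b =>
    simp only [altNbrs, List.mem_flatMap, List.mem_filterMap, List.mem_cons,
      List.not_mem_nil, or_false, adjP_iff, inbP,
      Option.ite_none_right_eq_some, Option.some.injEq, Prod.mk.injEq]
    constructor
    · rintro ⟨dr, hdr, dc, hdc, ⟨h1, h2, h3, h4⟩, ha, hb⟩
      have hdr' : -1 ≤ dr ∧ dr ≤ 1 := by rcases hdr with rfl | rfl | rfl <;> norm_num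
      have hdc' : -1 ≤ dc ∧ dc ≤ 1 := by rcases hdc with rfl | rfl | rfl <;> norm_num
      refine ⟨⟨by omega, by omega⟩, by omega, by omega, by omega, by omega⟩
    · rintro ⟨⟨ha, hb⟩, h1, h2, h3, h4⟩
      refine ⟨(a : Int) - r, by omega, (b : Int) - c, by omega, ⟨by omega, by omega, by omega, by omega⟩, by omega, by omega⟩

theorem nodup_altNbrs (h w r c : Nat) : (altNbrs h w r c).Nodup := by
  apply List.nodup_flatMap.2
  refine ⟨fun dr _ => ?_, ?_⟩
  · refine List.Nodup.filterMap ?_ (by decide)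
    intro a a' x hx hx'
    simp only [Option.mem_def, Option.ite_none_right_eq_some, Option.some.injEq] at hx hx'
    obtain ⟨⟨_, _, h3, _⟩, hxe⟩ := hx
    obtain ⟨⟨_, _, h3', _⟩, hxe'⟩ := hx'
    have e1 := congrArg Prod.snd hxe
    have e2 := congrArg Prod.snd hxe'
    simp only at e1 e2
    omega
  · have hnd : ([-1, 0, 1] : List Int).Nodup := by decide
    refine hnd.imp fun {d₁ d₂} n x h₁ h₂ => ?_
    simp only [List.mem_filterMap, List.mem_cons, List.not_mem_nil, or_false,
      Option.ite_none_right_eq_some, Option.some.injEq] at h₁ h₂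
    obtain ⟨dc₁, _, ⟨hb₁, _, _, _⟩, hx₁⟩ := h₁
    obtain ⟨dc₂, _, ⟨hb₂, _, _, _⟩, hx₂⟩ := h₂
    have e1 := congrArg Prod.fst hx₁
    have e2 := congrArg Prod.fst hx₂
    simp only at e1 e2
    exact n (by omega)

theorem adjP_comm (p q : Nat × Nat) : adjP p q = adjP q p := by
  simp only [adjP]
  by_cases h1 : p.1 - q.1 ≤ 1 <;> by_cases h2 : q.1 - p.1 ≤ 1 <;>
    by_cases h3 : p.2 - q.2 ≤ 1 <;> by_cases h4 : q.2 - p.2 ≤ 1 <;>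
    simp [h1, h2, h3, h4]

theorem cnt_nonneg (F : List (Nat × Nat)) (p : Nat × Nat) : 0 ≤ cnt F p := by
  simp [cnt]

theorem cnt_append (F G : List (Nat × Nat)) (p : Nat × Nat) :
    cnt (F ++ G) p = cnt F p + cnt G p := by
  simp [cnt, List.filter_append]

theorem cnt_mono (l s : List (Nat × Nat)) (p : Nat × Nat) (hnd : l.Nodup) (hsub : l ⊆ s) :
    cnt l p ≤ cnt s p := by
  have h1 : (l.filter (fun q => adjP p q)).Nodup := hnd.filter _
  have h2 : l.filter (fun q => adjP p q) ⊆ s.filter (fun q => adjP p q) := by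
    intro x hx
    rw [List.mem_filter] at hx ⊢
    exact ⟨hsub hx.1, hx.2⟩
  simp only [cnt]
  exact_mod_cast (h1.subperm h2).length_le

theorem cnt_eq_of_mem_iff (l s : List (Nat × Nat)) (p : Nat × Nat) (hl : l.Nodup)
    (hs : s.Nodup) (h : ∀ q, q ∈ l ↔ q ∈ s) : cnt l p = cnt s p :=
  le_antisymm (cnt_mono l s p hl fun x hx => (h x).mp hx)
    (cnt_mono s l p hs fun x hx => (h x).mpr hx)

theorem nodup_bound (h w : Nat) (l : List (Nat × Nat)) (hnd : l.Nodup)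
    (hin : ∀ p ∈ l, inbP h w p) : l.length ≤ h * w := by
  rw [← length_pvAllPos h w]
  exact (hnd.subperm fun x hx => (mem_pvAllPos h w x).mpr (hin x hx)).length_le

def pvIncList (g : List (List Int)) (L : List (Nat × Nat)) : List (List Int) :=
  L.foldl (fun g p => pvInc g p.1 p.2) g

theorem shape_pvIncList (g : List (List Int)) (L : List (Nat × Nat)) :
    Shape (pvIncList g L) g := by
  induction L generalizing g with
  | nil => exact shape_refl g
  | cons p L ih =>
    exact shape_trans (ih (pvInc g p.1 p.2)) (shape_pvInc g p.1 p.2)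

theorem pvGet_pvIncList (g : List (List Int)) (L : List (Nat × Nat))
    (hin : ∀ p ∈ L, p.1 < g.length ∧ p.2 < (g.getD p.1 []).length) (r c : Nat) :
    pvGet (pvIncList g L) r c = pvGet g r c + (L.count (r, c) : Int) := by
  induction L generalizing g with
  | nil => simp [pvIncList]
  | cons p L ih =>
    have hp := hin p List.mem_cons_self
    have hsh := shape_pvInc g p.1 p.2
    have hin' : ∀ q ∈ L, q.1 < (pvInc g p.1 p.2).length ∧
        q.2 < ((pvInc g p.1 p.2).getD q.1 []).length := by
      intro q hq
      rw [hsh.1, hsh.2 q.1]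
      exact hin q (List.mem_cons_of_mem _ hq)
    have hstep : pvIncList g (p :: L) = pvIncList (pvInc g p.1 p.2) L := rfl
    rw [hstep, ih _ hin']
    by_cases hpq : p = (r, c)
    · have hc1 : (List.count (r, c) (p :: L)) = L.count (r, c) + 1 := by
        simp [hpq]
      have hself : pvGet (pvInc g p.1 p.2) r c = pvGet g r c + 1 := by
        rw [hpq] at hp ⊢
        exact pvGet_pvInc_self g r c hp.1 hp.2
      rw [hself, hc1]
      push_cast
      ring
    · have hbeq : ((r, c) == p) = false := by
        rw [beq_eq_false_iff_ne]
        exact fun e => hpq e.symm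
      have hc1 : (List.count (r, c) (p :: L)) = L.count (r, c) := by
        simp [List.count_cons]
        exact hpq
      rw [pvGet_pvInc_ne g p.1 p.2 r c (by simpa using hpq), hc1]

theorem pvIncCollect_char (g : List (List Int)) (acc : List (Nat × Nat))
    (L : List (Nat × Nat)) (hnd : L.Nodup)
    (hin : ∀ p ∈ L, p.1 < g.length ∧ p.2 < (g.getD p.1 []).length) :
    pvIncCollect g acc L =
      (pvIncList g L, acc ++ L.filter (fun p => pvGet g p.1 p.2 == 9)) := by
  induction L generalizing g acc with
  | nil => simp [pvIncCollect, pvIncList]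
  | cons p L ih =>
    obtain ⟨hpL, hndL⟩ := List.nodup_cons.mp hnd
    have hp := hin p List.mem_cons_self
    have hsh := shape_pvInc g p.1 p.2
    have hin' : ∀ q ∈ L, q.1 < (pvInc g p.1 p.2).length ∧
        q.2 < ((pvInc g p.1 p.2).getD q.1 []).length := by
      intro q hq
      rw [hsh.1, hsh.2 q.1]
      exact hin q (List.mem_cons_of_mem _ hq)
    have hget : pvGet (pvInc g p.1 p.2) p.1 p.2 = pvGet g p.1 p.2 + 1 :=
      pvGet_pvInc_self g p.1 p.2 hp.1 hp.2
    have hcond : (pvGet (pvInc g p.1 p.2) p.1 p.2 == 10) = (pvGet g p.1 p.2 == 9) := by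
      rw [hget]
      by_cases h9 : pvGet g p.1 p.2 = 9
      · simp [h9]
      · have h10 : pvGet g p.1 p.2 + 1 ≠ 10 := by omega
        simp [h9, h10]
    have hfilter : L.filter (fun q => pvGet (pvInc g p.1 p.2) q.1 q.2 == 9) =
        L.filter (fun q => pvGet g q.1 q.2 == 9) := by
      refine List.filter_congr fun q hq => ?_
      rw [pvGet_pvInc_ne g p.1 p.2 q.1 q.2 (by
        intro e
        exact hpL (by
          have : p = q := by
            cases p; cases q; simpa using e
          rw [this]; exact hq))]
    have hstepL : pvIncList g (p :: L) = pvIncList (pvInc g p.1 p.2) L := rfl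
    by_cases h9 : (pvGet g p.1 p.2 == 9) = true
    · have h10 : (pvGet (pvInc g p.1 p.2) p.1 p.2 == 10) = true := by rw [hcond]; exact h9
      have hstep1 : pvIncCollect g acc (p :: L) =
          pvIncCollect (pvInc g p.1 p.2) (acc ++ [p]) L := by
        simp only [pvIncCollect, List.foldl_cons, h10, if_true]
      rw [hstep1, ih _ _ hndL hin', hfilter, ← hstepL]
      simp [h9]
    · have h10 : (pvGet (pvInc g p.1 p.2) p.1 p.2 == 10) = false := by
        rw [hcond]
        simpa using h9
      have hstep1 : pvIncCollect g acc (p :: L) =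
          pvIncCollect (pvInc g p.1 p.2) acc L := by
        simp only [pvIncCollect, List.foldl_cons, h10, Bool.false_eq_true, if_false]
      rw [hstep1, ih _ _ hndL hin', hfilter, ← hstepL]
      have h9' : (pvGet g p.1 p.2 == 9) = false := by simpa using h9
      simp [h9']

theorem count_char (g : List (List Int)) (k : Int) (L : List (Nat × Nat)) (hnd : L.Nodup) :
    (L.foldl (fun (st : List (List Int) × Int) p =>
      if 10 ≤ pvGet st.1 p.1 p.2 then (st.1.modify p.1 (fun row => row.set p.2 0), st.2 + 1)
      else st) (g, k)).2 =
    k + ((L.filter (fun p => decide (10 ≤ pvGet g p.1 p.2))).length : Int) := by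
  induction L generalizing g k with
  | nil => simp
  | cons p L ih =>
    obtain ⟨hpL, hndL⟩ := List.nodup_cons.mp hnd
    have hfilter : ∀ g' : List (List Int), (∀ q ∈ L, pvGet g' q.1 q.2 = pvGet g q.1 q.2) →
        L.filter (fun q => decide (10 ≤ pvGet g' q.1 q.2)) =
        L.filter (fun q => decide (10 ≤ pvGet g q.1 q.2)) := by
      intro g' hg'
      exact List.filter_congr fun q hq => by rw [hg' q hq]
    have hne : ∀ q ∈ L, pvGet (g.modify p.1 (fun row => row.set p.2 0)) q.1 q.2 =
        pvGet g q.1 q.2 := by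
      intro q hq
      refine pvGet_zero_ne g p.1 p.2 q.1 q.2 fun e => hpL ?_
      have hpq : p = q := by cases p; cases q; simpa using e
      rw [hpq]; exact hq
    simp only [List.foldl_cons]
    by_cases hc : 10 ≤ pvGet g p.1 p.2
    · rw [if_pos hc, ih _ (k + 1) hndL, hfilter _ hne]
      have hd : decide (10 ≤ pvGet g p.1 p.2) = true := by simpa using hc
      simp [hd]
      ring
    · rw [if_neg hc, ih g k hndL]
      have hd : decide (10 ≤ pvGet g p.1 p.2) = false := by simpa using hc
      simp [hd]

theorem cnt_singleton (x p : Nat × Nat) :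
    cnt [x] p = if adjP p x = true then 1 else 0 := by
  by_cases h : adjP p x = true <;> simp [cnt, h]

-- processing one worklist item (shared by A's FIFO run and B's LIFO run: the
-- invariant does not care which pending cell is removed)
theorem process_one (g0 : List (List Int)) (hpre : PreS g0) (g : List (List Int))
    (D L1 L2 : List (Nat × Nat)) (r c : Nat)
    (hinv : INV g0 g D (L1 ++ (r, c) :: L2)) (Nb : List (Nat × Nat)) (hNbnd : Nb.Nodup)
    (hNbmem : ∀ q, q ∈ Nb ↔ inbP g0.length (pvW g0) q ∧ adjP (r, c) q = true) :
    INV g0 (pvIncCollect g (L1 ++ L2) Nb).1 (D ++ [(r, c)])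
      (pvIncCollect g (L1 ++ L2) Nb).2 := by
  obtain ⟨hsh, hnd, hmem, hmod, hiff, hjust⟩ := hinv
  have hrc : (r, c) ∈ D ++ (L1 ++ (r, c) :: L2) := by simp
  have hrcin := hmem (r, c) hrc
  have hNin : ∀ q ∈ Nb, q.1 < g.length ∧ q.2 < (g.getD q.1 []).length := by
    intro q hq
    have hinb := ((hNbmem q).mp hq).1
    refine ⟨by rw [hsh.1]; exact hinb.1, ?_⟩
    rw [hsh.2 q.1]
    exact lt_of_lt_of_le hinb.2 (hpre q.1 hinb.1)
  rw [pvIncCollect_char g (L1 ++ L2) Nb hNbnd hNin]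
  have hcount : ∀ q : Nat × Nat, ((Nb.count q) : Int) =
      if inbP g0.length (pvW g0) q ∧ adjP q (r, c) = true then 1 else 0 := by
    intro q
    by_cases hq : inbP g0.length (pvW g0) q ∧ adjP q (r, c) = true
    · have hm : q ∈ Nb := (hNbmem q).mpr ⟨hq.1, by rw [adjP_comm]; exact hq.2⟩
      rw [List.count_eq_one_of_mem hNbnd hm, if_pos hq]; rfl
    · have hnm : q ∉ Nb := fun hm => by
        rcases (hNbmem q).mp hm with ⟨h1, h2⟩
        exact hq ⟨h1, by rw [adjP_comm]; exact h2⟩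
      rw [List.count_eq_zero_of_not_mem hnm, if_neg hq]; rfl
  have hget : ∀ q : Nat × Nat, pvGet (pvIncList g Nb) q.1 q.2 =
      pvGet g q.1 q.2 +
        (if inbP g0.length (pvW g0) q ∧ adjP q (r, c) = true then 1 else 0) := by
    intro q
    rw [pvGet_pvIncList g Nb hNin q.1 q.2]
    have := hcount (q.1, q.2)
    simp only [Prod.mk.eta] at this
    rw [this]
  have happ : ∀ q : Nat × Nat, q ∈ Nb.filter (fun q => pvGet g q.1 q.2 == 9) →
      (inbP g0.length (pvW g0) q ∧ elig g0 q) ∧ pvGet g q.1 q.2 = 9 ∧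
        adjP (r, c) q = true := by
    intro q hq
    rw [List.mem_filter, hNbmem q, beq_iff_eq] at hq
    obtain ⟨⟨hinb, hadj⟩, h9⟩ := hq
    have hm := hmod q hinb
    have hc0 := cnt_nonneg D q
    have he : elig g0 q := by
      simp only [elig]
      simp only [v0] at hm
      omega
    exact ⟨⟨hinb, he⟩, h9, hadj⟩
  have hnotold : ∀ q ∈ Nb.filter (fun q => pvGet g q.1 q.2 == 9),
      q ∉ D ++ (L1 ++ (r, c) :: L2) := by
    intro q hq hold
    obtain ⟨⟨hinb, he⟩, h9, _⟩ := happ q hq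
    have := (hiff q hinb he).mpr hold
    omega
  have hperm : List.Perm ((D ++ [(r, c)]) ++ ((L1 ++ L2) ++
      Nb.filter (fun q => pvGet g q.1 q.2 == 9)))
      ((D ++ (L1 ++ (r, c) :: L2)) ++ Nb.filter (fun q => pvGet g q.1 q.2 == 9)) := by
    apply List.perm_iff_count.mpr
    intro x
    simp only [List.count_append, List.count_cons, List.count_nil]
    split_ifs <;> omega
  have hmemnew : ∀ q : Nat × Nat, q ∈ (D ++ [(r, c)]) ++ ((L1 ++ L2) ++
      Nb.filter (fun q => pvGet g q.1 q.2 == 9)) ↔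
      q ∈ D ++ (L1 ++ (r, c) :: L2) ∨
        q ∈ Nb.filter (fun q => pvGet g q.1 q.2 == 9) := by
    intro q
    rw [hperm.mem_iff, List.mem_append]
  have hnd' : ((D ++ [(r, c)]) ++ ((L1 ++ L2) ++
      Nb.filter (fun q => pvGet g q.1 q.2 == 9))).Nodup := by
    refine hperm.nodup_iff.mpr (List.nodup_append.mpr ⟨hnd, (hNbnd.filter _), ?_⟩)
    intro a ha b hb hab
    exact hnotold b hb (hab ▸ ha)
  have hDnd : (D ++ [(r, c)]).Nodup := by
    have hsub : List.Sublist (D ++ [(r, c)]) (D ++ (L1 ++ (r, c) :: L2)) :=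
      List.Sublist.append_left
        (((List.nil_sublist L2).cons₂ (r, c)).trans (List.sublist_append_right _ _)) D
    exact hnd.sublist hsub
  have hcntD : ∀ q, cnt (D ++ [(r, c)]) q = cnt D q +
      (if adjP q (r, c) = true then 1 else 0) := by
    intro q
    rw [cnt_append, cnt_singleton]
  refine ⟨shape_trans (shape_pvIncList g Nb) hsh, hnd', ?_, ?_, ?_, ?_⟩
  · intro q hq
    rcases (hmemnew q).mp hq with hq | hq
    · exact hmem q hq
    · exact (happ q hq).1
  · intro q hin
    rw [hget q, hmod q hin, hcntD q]
    have : (if inbP g0.length (pvW g0) q ∧ adjP q (r, c) = true then (1 : Int) else 0) =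
        (if adjP q (r, c) = true then (1 : Int) else 0) := by
      by_cases hadj : adjP q (r, c) = true
      · rw [if_pos ⟨hin, hadj⟩, if_pos hadj]
      · rw [if_neg (fun h => hadj h.2), if_neg hadj]
    rw [this]
    ring
  · intro q hin he
    rw [hmemnew q, hget q]
    constructor
    · intro h10
      by_cases hadj : adjP q (r, c) = true
      · by_cases hold : 10 ≤ pvGet g q.1 q.2
        · exact Or.inl ((hiff q hin he).mp hold)
        · refine Or.inr (List.mem_filter.mpr ⟨(hNbmem q).mpr ⟨hin, by rw [adjP_comm]; exact hadj⟩, ?_⟩)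
          rw [beq_iff_eq]
          rw [if_pos (⟨hin, hadj⟩ : inbP g0.length (pvW g0) q ∧ adjP q (r, c) = true)] at h10
          omega
      · rw [if_neg (fun h => hadj h.2)] at h10
        exact Or.inl ((hiff q hin he).mp (by omega))
    · intro hmem2
      rcases hmem2 with hold | hnew
      · have h12 := (hiff q hin he).mpr hold
        have hb : (0:Int) ≤ if inbP g0.length (pvW g0) q ∧ adjP q (r, c) = true
            then 1 else 0 := by split_ifs <;> omega
        omega
      · obtain ⟨_, h9, hadj⟩ := happ q hnew
        have hadj' : adjP q (r, c) = true := by rw [adjP_comm]; exact hadj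
        rw [if_pos (⟨hin, hadj'⟩ : inbP g0.length (pvW g0) q ∧ adjP q (r, c) = true)]
        omega
  · intro S hS q hq
    rcases (hmemnew q).mp hq with hq | hq
    · exact hjust S hS q hq
    · obtain ⟨⟨hinb, he⟩, h9, hadj⟩ := happ q hq
      have hsub : (D ++ [(r, c)]) ⊆ S := by
        intro x hx
        rw [List.mem_append] at hx
        rcases hx with hx | hx
        · exact hjust S hS x (List.mem_append_left _ hx)
        · simp only [List.mem_singleton] at hx
          exact hjust S hS x (hx ▸ hrc)
      have hmono := cnt_mono (D ++ [(r, c)]) S q hDnd hsub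
      have hcq := hcntD q
      have hadj' : adjP q (r, c) = true := by rw [adjP_comm]; exact hadj
      rw [if_pos hadj'] at hcq
      have hm := hmod q hinb
      exact hS.2 q hinb he (by omega)

-- the finished-run conclusion, extracted once
theorem final_of_inv (g0 g : List (List Int)) (D : List (Nat × Nat))
    (hinv : INV g0 g D []) : FinalP g0 g D := by
  obtain ⟨hsh, hnd, hmem, hmod, hiff, hjust⟩ := hinv
  rw [List.append_nil] at hnd hmem hiff hjust
  refine ⟨hnd, hmem, hsh, hmod, ?_, hjust⟩
  intro p hin he
  rw [← hmod p hin]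
  exact hiff p hin he

-- A's run: recursion on the FIFO worklist, head first
theorem addAdj_run (g0 : List (List Int)) (hpre : PreS g0) (fuel : Nat) :
    ∀ (g : List (List Int)) (inds D : List (Nat × Nat)),
      INV g0 g D inds → g0.length * pvW g0 + 1 ≤ fuel + D.length →
      ∃ F : List (Nat × Nat), FinalP g0 (add_adjecent fuel g inds) F := by
  induction fuel with
  | zero =>
    intro g inds D hinv hfuel
    exfalso
    have hD : D.Nodup := ((List.nodup_append.mp hinv.2.1)).1
    have hlen := nodup_bound g0.length (pvW g0) D hD
      (fun p hp => (hinv.2.2.1 p (List.mem_append_left _ hp)).1)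
    omega
  | succ fuel ih =>
    intro g inds D hinv hfuel
    cases inds with
    | nil => exact ⟨D, final_of_inv g0 g D hinv⟩
    | cons p0 rest =>
      obtain ⟨r, c⟩ := p0
      have hH : g.length = g0.length := hinv.1.1
      have hWg : pvW g = pvW g0 := pvW_of_shape hinv.1
      have hunfold : add_adjecent (fuel + 1) g ((r, c) :: rest) =
          add_adjecent fuel (pvIncCollect g rest (pvNbhd g.length (pvW g) r c)).1
            (pvIncCollect g rest (pvNbhd g.length (pvW g) r c)).2 := rfl
      rw [hunfold, hH, hWg]
      have hinv' := process_one g0 hpre g D [] rest r c (by simpa using hinv)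
        (pvNbhd g0.length (pvW g0) r c) (nodup_pvNbhd _ _ _ _)
        (mem_pvNbhd g0.length (pvW g0) r c)
      rw [List.nil_append] at hinv'
      exact ih _ _ (D ++ [(r, c)]) hinv'
        (by simp only [List.length_append, List.length_cons, List.length_nil]; omega)

-- B's run: the while/pop loop, last element first
theorem stack_run (g0 : List (List Int)) (hpre : PreS g0) (fuel : Nat) :
    ∀ (g : List (List Int)) (stack D : List (Nat × Nat)),
      INV g0 g D stack → g0.length * pvW g0 + 1 ≤ fuel + D.length →
      ∃ F : List (Nat × Nat),
        FinalP g0 (altFlood g0.length (pvW g0) fuel g stack) F := by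
  induction fuel with
  | zero =>
    intro g stack D hinv hfuel
    exfalso
    have hD : D.Nodup := ((List.nodup_append.mp hinv.2.1)).1
    have hlen := nodup_bound g0.length (pvW g0) D hD
      (fun p hp => (hinv.2.2.1 p (List.mem_append_left _ hp)).1)
    omega
  | succ fuel ih =>
    intro g stack D hinv hfuel
    rcases List.eq_nil_or_concat stack with rfl | ⟨L1, p, rfl⟩
    all_goals try rw [List.concat_eq_append] at hinv ⊢
    · refine ⟨D, ?_⟩
      have : altFlood g0.length (pvW g0) (fuel + 1) g [] = g := by
        simp [altFlood]
      rw [this]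
      exact final_of_inv g0 g D hinv
    · obtain ⟨r, c⟩ := p
      have hunfold : altFlood g0.length (pvW g0) (fuel + 1) g (L1 ++ [(r, c)]) =
          altFlood g0.length (pvW g0) fuel
            (pvIncCollect g L1 (altNbrs g0.length (pvW g0) r c)).1
            (pvIncCollect g L1 (altNbrs g0.length (pvW g0) r c)).2 := by
        simp [altFlood]
      rw [hunfold]
      have hinv' := process_one g0 hpre g D L1 [] r c (by simpa using hinv)
        (altNbrs g0.length (pvW g0) r c) (nodup_altNbrs _ _ _ _)
        (mem_altNbrs g0.length (pvW g0) r c)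
      rw [List.append_nil] at hinv'
      exact ih _ _ (D ++ [(r, c)]) hinv'
        (by simp only [List.length_append, List.length_cons, List.length_nil]; omega)

-- B's literal 'len(input_list[0]) if input_list else 0' equals pvW
theorem altW_eq (g : List (List Int)) :
    (if g = [] then 0 else (g.getD 0 []).length) = pvW g := by
  cases g <;> simp [pvW]

-- ===== VERDICT (by name: the statement is the Claim_ definition above) =====
theorem step_spec : Claim_equal_step := by
  unfold Claim_equal_step Spec_step
  intro g0 _ hpre
  have hpreS := preS_of_pre g0 hpre
  have hAllIn : ∀ p ∈ pvAllPos g0.length (pvW g0),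
      p.1 < g0.length ∧ p.2 < (g0.getD p.1 []).length := by
    intro p hp
    have hinb := (mem_pvAllPos _ _ p).mp hp
    exact ⟨hinb.1, lt_of_lt_of_le hinb.2 (hpreS p.1 hinb.1)⟩
  have hcnt0 : ∀ p : Nat × Nat, cnt [] p = 0 := by intro p; simp [cnt]
  have hmod0 : ∀ p, inbP g0.length (pvW g0) p →
      pvGet (pvIncList g0 (pvAllPos g0.length (pvW g0))) p.1 p.2 = v0 g0 p + cnt [] p := by
    intro p hin
    rw [pvGet_pvIncList g0 _ hAllIn p.1 p.2, hcnt0 p,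
      List.count_eq_one_of_mem (nodup_pvAllPos _ _)
        ((mem_pvAllPos _ _ (p.1, p.2)).mpr (by simpa using hin))]
    simp [v0]
  have hfmem : ∀ q : Nat × Nat,
      q ∈ (pvAllPos g0.length (pvW g0)).filter (fun p => pvGet g0 p.1 p.2 == 9) ↔
        inbP g0.length (pvW g0) q ∧ pvGet g0 q.1 q.2 = 9 := by
    intro q
    rw [List.mem_filter, mem_pvAllPos, beq_iff_eq]
  -- the shared initial state after the global +1 pass
  have hinit : INV g0 (pvIncList g0 (pvAllPos g0.length (pvW g0))) []
      ((pvAllPos g0.length (pvW g0)).filter (fun p => pvGet g0 p.1 p.2 == 9)) := by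
    refine ⟨shape_pvIncList g0 _,
      by simpa using (nodup_pvAllPos g0.length (pvW g0)).filter _, ?_, hmod0, ?_, ?_⟩
    · intro p hp
      rw [List.nil_append, hfmem p] at hp
      exact ⟨hp.1, by simp only [elig]; omega⟩
    · intro p hin he
      rw [hmod0 p hin, hcnt0 p, List.nil_append, hfmem p]
      simp only [elig] at he
      simp only [v0]
      constructor
      · intro h10
        exact ⟨hin, by omega⟩
      · intro ⟨_, h9⟩
        omega
    · intro S hS p hp
      rw [List.nil_append, hfmem p] at hp
      have := cnt_nonneg S p
      exact hS.2 p hp.1 (by simp only [elig]; omega) (by simp only [v0]; omega)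
  have hchar := pvIncCollect_char g0 [] (pvAllPos g0.length (pvW g0))
    (nodup_pvAllPos _ _) hAllIn
  -- run both worklists
  obtain ⟨FA, hFAnd, hFAmem, hshA, hmodA, hiffA, hjustA⟩ :=
    addAdj_run g0 hpreS (g0.length * pvW g0 + 1)
      (pvIncList g0 (pvAllPos g0.length (pvW g0)))
      ((pvAllPos g0.length (pvW g0)).filter (fun p => pvGet g0 p.1 p.2 == 9)) []
      hinit (by simp)
  obtain ⟨FB, hFBnd, hFBmem, hshB, hmodB, hiffB, hjustB⟩ :=
    stack_run g0 hpreS (g0.length * pvW g0 + 1)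
      (pvIncList g0 (pvAllPos g0.length (pvW g0)))
      ((pvAllPos g0.length (pvW g0)).filter (fun p => pvGet g0 p.1 p.2 == 9)) []
      hinit (by simp)
  -- the two flash sets coincide (each is the least closed set)
  have hClosedA : Closed g0 g0.length (pvW g0) FA :=
    ⟨hFAnd, fun p hin he h10 => (hiffA p hin he).mp h10⟩
  have hClosedB : Closed g0 g0.length (pvW g0) FB :=
    ⟨hFBnd, fun p hin he h10 => (hiffB p hin he).mp h10⟩
  have hcntAB : ∀ p, cnt FA p = cnt FB p := fun p =>
    cnt_eq_of_mem_iff FA FB p hFAnd hFBnd fun q =>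
      ⟨fun h => hjustA FB hClosedB q h, fun h => hjustB FA hClosedA q h⟩
  have hgeq : ∀ p ∈ pvAllPos g0.length (pvW g0),
      pvGet (add_adjecent (g0.length * pvW g0 + 1)
        (pvIncList g0 (pvAllPos g0.length (pvW g0)))
        ((pvAllPos g0.length (pvW g0)).filter (fun p => pvGet g0 p.1 p.2 == 9))) p.1 p.2 =
      pvGet (altFlood g0.length (pvW g0) (g0.length * pvW g0 + 1)
        (pvIncList g0 (pvAllPos g0.length (pvW g0)))
        ((pvAllPos g0.length (pvW g0)).filter (fun p => pvGet g0 p.1 p.2 == 9))) p.1 p.2 := by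
    intro p hp
    have hin := (mem_pvAllPos _ _ p).mp hp
    rw [hmodA p hin, hmodB p hin, hcntAB p]
  -- evaluate A's return value
  have hlenA : (add_adjecent (g0.length * pvW g0 + 1)
      (pvIncList g0 (pvAllPos g0.length (pvW g0)))
      ((pvAllPos g0.length (pvW g0)).filter (fun p => pvGet g0 p.1 p.2 == 9))).length =
      g0.length := hshA.1
  have hWA : pvW (add_adjecent (g0.length * pvW g0 + 1)
      (pvIncList g0 (pvAllPos g0.length (pvW g0)))
      ((pvAllPos g0.length (pvW g0)).filter (fun p => pvGet g0 p.1 p.2 == 9))) = pvW g0 :=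
    pvW_of_shape hshA
  have hstepA : step g0 =
      ((pvAllPos g0.length (pvW g0)).filter (fun p => decide (10 ≤
        pvGet (add_adjecent (g0.length * pvW g0 + 1)
          (pvIncList g0 (pvAllPos g0.length (pvW g0)))
          ((pvAllPos g0.length (pvW g0)).filter (fun p => pvGet g0 p.1 p.2 == 9)))
          p.1 p.2))).length := by
    simp only [step]
    rw [hchar]
    simp only [List.nil_append, update_flare, hlenA, hWA]
    rw [count_char _ 0 _ (nodup_pvAllPos _ _)]
    simp
  -- evaluate B's return value
  have hstepB : step_alt g0 =
      ((pvAllPos g0.length (pvW g0)).filter (fun p => decide (10 ≤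
        pvGet (altFlood g0.length (pvW g0) (g0.length * pvW g0 + 1)
          (pvIncList g0 (pvAllPos g0.length (pvW g0)))
          ((pvAllPos g0.length (pvW g0)).filter (fun p => pvGet g0 p.1 p.2 == 9)))
          p.1 p.2))).length := by
    simp only [step_alt, altW_eq]
    rw [hchar]
    simp only [List.nil_append, altCount]
    rw [count_char _ 0 _ (nodup_pvAllPos _ _)]
    simp
  rw [hstepA, hstepB, List.filter_congr (fun p hp => by rw [hgeq p hp])]
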